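-- pv_equiv track=rewrite | github.com/Juandiego001/cut-stock-solver | tests/list_insertions.py | obtener_inserciones_posibles
-- ===== SOURCE A (Python) =====
-- def obtener_inserciones_posibles(arreglo_original):
--     """
--     Genera todos los arreglos resultantes de tomar cada elemento
--     del arreglo original y reinsertarlo en todas las posiciones posibles.
--     """
--
--     # Usamos un diccionario para almacenar los resultados, donde la clave es el índice del elemento
--     # movido y el valor es una lista de los arreglos resultantes.
--     resultados_totales = {}
--
--     n = len(arreglo_original)
--
--     # 1. Iterar sobre cada elemento del arreglo original para moverlo
--     for i in range(n):
--
--         elemento_a_mover = arreglo_original[i]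
--
--         # 2. Crear un arreglo temporal que es el original sin el elemento en la posición 'i'
--         # Esto es la lista base donde se insertará el elemento_a_mover
--         arreglo_sin_elemento = arreglo_original[:i] + arreglo_original[i+1:]
--
--         inserciones_para_elemento = []
--
--         # 3. Iterar sobre todas las posibles posiciones de inserción (índices de 0 a n)
--         # El tamaño final del arreglo es n, por lo que las posiciones de inserción van de 0 a n
--         for j in range(n):
--             # Creamos una copia del arreglo_sin_elemento para la inserción
--             nuevo_arreglo = arreglo_sin_elemento[:]
--
--             # Insertar el elemento extraído en la posición 'j'
--             # Esta es la parte clave: list.insert(índice, valor)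
--             nuevo_arreglo.insert(j, elemento_a_mover)
--
--             # Guardamos el nuevo arreglo resultante
--             inserciones_para_elemento.append(nuevo_arreglo)
--
--         # 4. Guardar todos los resultados para el elemento que se movió, identificando por su índice original
--         resultados_totales[i] = inserciones_para_elemento
--
--     return resultados_totales
-- ===== SOURCE B (Python) =====
-- def obtener_inserciones_posibles(arreglo_original):
--     """Same result as A, but each row after the first is derived from the
--     previous one by a single adjacent swap instead of rebuilding from slices."""
--     n = len(arreglo_original)
--     resultados_totales = {}
--     for i in range(n):
--         elemento = arreglo_original[i]
--         base = arreglo_original[:i] + arreglo_original[i+1:]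
--         cur = [elemento] + base          # element inserted at position 0
--         filas = [cur[:]]
--         for j in range(1, n):
--             cur[j-1], cur[j] = cur[j], cur[j-1]   # move element one step right
--             filas.append(cur[:])
--         resultados_totales[i] = filas
--     return resultados_totales
-- ===== Notes on version B (the rewrite author's own statement) =====
-- stated objective: alternative
-- what changed: Each inner row is generated incrementally from the previous row by one adjacent transposition (moving the extracted element one step right), instead of re-copying the removed-element base and calling list.insert for every position.
import Mathlib
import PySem

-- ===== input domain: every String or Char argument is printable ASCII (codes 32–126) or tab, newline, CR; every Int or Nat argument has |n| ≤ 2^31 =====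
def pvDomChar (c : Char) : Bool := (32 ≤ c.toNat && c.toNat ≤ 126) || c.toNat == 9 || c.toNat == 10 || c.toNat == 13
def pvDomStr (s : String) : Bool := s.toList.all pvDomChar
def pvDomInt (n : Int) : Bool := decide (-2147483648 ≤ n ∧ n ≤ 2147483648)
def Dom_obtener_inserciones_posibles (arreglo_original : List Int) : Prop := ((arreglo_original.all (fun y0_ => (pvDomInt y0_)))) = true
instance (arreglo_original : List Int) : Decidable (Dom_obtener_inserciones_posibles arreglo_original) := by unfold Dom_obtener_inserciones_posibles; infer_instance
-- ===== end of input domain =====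

-- B derives each successive row from the previous one by a single adjacent
-- transposition instead of re-copying the base slice and inserting (alternative
-- decomposition, same asymptotic cost).

-- ===== PORT A =====
-- arr[i] is always in range here; pyGetD's default is never used.
def obtener_inserciones_posibles (arreglo_original : List Int) : List (Int × List (List Int)) :=
  let n : Int := arreglo_original.length
  ((PySem.List.pyRange 0 n 1).foldl
    (fun (res : PySem.Dict Int (List (List Int))) i =>
      let elemento_a_mover := PySem.List.pyGetD arreglo_original i 0
      let arreglo_sin_elemento :=
        PySem.List.slice arreglo_original none (some i) ++
        PySem.List.slice arreglo_original (some (i + 1)) none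
      let inserciones :=
        (PySem.List.pyRange 0 n 1).foldl
          (fun acc j => acc ++ [PySem.List.insert arreglo_sin_elemento j elemento_a_mover]) []
      res.insert i inserciones)
    PySem.Dict.empty).items

-- ===== PORT B =====
-- cur[j-1], cur[j] = cur[j], cur[j-1] : swap the adjacent entries at j-1 and j.
def pvSwapAdj : List Int → Nat → List Int
  | a :: b :: rest, 0 => b :: a :: rest
  | a :: rest, k + 1 => a :: pvSwapAdj rest k
  | l, _ => l

def obtener_inserciones_posibles_alt (arreglo_original : List Int) : List (Int × List (List Int)) :=
  let n : Int := arreglo_original.length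
  ((PySem.List.pyRange 0 n 1).foldl
    (fun (res : PySem.Dict Int (List (List Int))) i =>
      let elemento := PySem.List.pyGetD arreglo_original i 0
      let base :=
        PySem.List.slice arreglo_original none (some i) ++
        PySem.List.slice arreglo_original (some (i + 1)) none
      let cur0 := elemento :: base
      let filas :=
        ((PySem.List.pyRange 1 n 1).foldl
          (fun (st : List (List Int) × List Int) j =>
            let cur' := pvSwapAdj st.2 (j - 1).toNat
            (st.1 ++ [cur'], cur'))
          ([cur0], cur0)).1
      res.insert i filas)
    PySem.Dict.empty).items

-- ===== PRECONDITION & SPEC =====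
def Spec_obtener_inserciones_posibles (arreglo_original : List Int) (out : List (Int × List (List Int))) : Prop := out = obtener_inserciones_posibles_alt arreglo_original
instance (arreglo_original : List Int) (out : List (Int × List (List Int))) : Decidable (Spec_obtener_inserciones_posibles arreglo_original out) := by unfold Spec_obtener_inserciones_posibles; infer_instance

-- ===== CLAIM (what is proved, stated in full; the proofs are below) =====
def Claim_equal_obtener_inserciones_posibles : Prop := ∀ (arreglo_original : List Int), Dom_obtener_inserciones_posibles arreglo_original → Spec_obtener_inserciones_posibles arreglo_original (obtener_inserciones_posibles arreglo_original)

-- ===== LEMMAS AND PROOFS =====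

-- swapping the element e (sitting at index s) with its right neighbour moves it to index s+1
theorem pvSwapAdj_insert (e : Int) : ∀ (s : Nat) (base : List Int), s < base.length →
    pvSwapAdj (base.take s ++ e :: base.drop s) s = base.take (s + 1) ++ e :: base.drop (s + 1) := by
  intro s
  induction s with
  | zero =>
    intro base h
    cases base with
    | nil => simp at h
    | cons b rest => simp [pvSwapAdj]
  | succ k ih =>
    intro base h
    cases base with
    | nil => simp at h
    | cons b rest =>
      simp only [List.take_succ_cons, List.drop_succ_cons, List.cons_append, pvSwapAdj]
      rw [ih rest (by simpa using h)]

-- invariant of B's inner swap loop, over List.range' s t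
theorem pvLoopInv (e : Int) : ∀ (t s : Nat) (acc : List (List Int)) (base : List Int),
    s + t ≤ base.length →
    (List.range' s t).foldl
      (fun (st : List (List Int) × List Int) k =>
        let cur' := pvSwapAdj st.2 k
        (st.1 ++ [cur'], cur'))
      (acc, base.take s ++ e :: base.drop s)
    = (acc ++ (List.range' (s + 1) t).map (fun j => base.take j ++ e :: base.drop j),
       base.take (s + t) ++ e :: base.drop (s + t)) := by
  intro t
  induction t with
  | zero => intro s acc base _; simp
  | succ t ih =>
    intro s acc base h
    rw [List.range'_succ]
    simp only [List.foldl_cons]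
    rw [pvSwapAdj_insert e s base (by omega)]
    rw [ih (s + 1) (acc ++ [base.take (s + 1) ++ e :: base.drop (s + 1)]) base (by omega)]
    have h1 : s + 1 + t = s + (t + 1) := by omega
    rw [h1, List.range'_succ]
    simp [List.append_assoc]

-- B's inner loop produces exactly all insertions of e into base
theorem pvRowB (base : List Int) (e : Int) :
    ((PySem.List.pyRange 1 ((base.length : Int) + 1) 1).foldl
      (fun (st : List (List Int) × List Int) j =>
        let cur' := pvSwapAdj st.2 (j - 1).toNat
        (st.1 ++ [cur'], cur'))
      ([e :: base], e :: base)).1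
    = (List.range (base.length + 1)).map (fun j => base.take j ++ e :: base.drop j) := by
  rw [PySem.List.pyRange_one]
  have hlen : (((base.length : Int) + 1) - 1).toNat = base.length := by omega
  rw [hlen, List.foldl_map]
  have hfun : (fun (st : List (List Int) × List Int) (k : Nat) =>
      (fun (st : List (List Int) × List Int) (j : Int) =>
        let cur' := pvSwapAdj st.2 (j - 1).toNat
        (st.1 ++ [cur'], cur')) st ((1 : Int) + k))
      = (fun (st : List (List Int) × List Int) k =>
        let cur' := pvSwapAdj st.2 k
        (st.1 ++ [cur'], cur')) := by
    funext st k
    simp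
  rw [hfun]
  have h0 : (e :: base) = base.take 0 ++ e :: base.drop 0 := by simp
  rw [List.range_eq_range']
  conv_lhs => rw [h0]
  rw [pvLoopInv e base.length 0 [base.take 0 ++ e :: base.drop 0] base (by omega)]
  have hr : List.range (base.length + 1) = 0 :: List.range' 1 base.length := by
    rw [List.range_eq_range', List.range'_succ]
  rw [hr]
  simp

-- A's inner loop produces the same list of insertions
theorem pvRowA (base : List Int) (e : Int) :
    (PySem.List.pyRange 0 ((base.length : Int) + 1) 1).foldl
      (fun acc j => acc ++ [PySem.List.insert base j e]) []
    = (List.range (base.length + 1)).map (fun j => base.take j ++ e :: base.drop j) := by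
  rw [PySem.List.foldl_append_singleton_eq_map, PySem.List.pyRange_one]
  have hlen : (((base.length : Int) + 1) - 0).toNat = base.length + 1 := by omega
  rw [hlen, List.map_map, List.nil_append]
  apply List.map_congr_left
  intro k hk
  simp only [List.mem_range] at hk
  simp only [Function.comp]
  rw [show (0 : Int) + (k : Int) = ((k : Nat) : Int) by omega]
  exact PySem.List.insert_natCast base k e (by omega)

-- ===== VERDICT (by name: the statement is the Claim_ definition above) =====
theorem obtener_inserciones_posibles_spec : Claim_equal_obtener_inserciones_posibles := by
  intro arr _
  unfold Spec_obtener_inserciones_posibles obtener_inserciones_posibles obtener_inserciones_posibles_alt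
  simp only []
  congr 1
  apply PySem.List.foldl_congr_mem
  intro res i hi
  rw [PySem.List.mem_pyRange_one] at hi
  congr 1
  -- both rows equal the map of insertions
  set e := PySem.List.pyGetD arr i 0 with he
  set base := PySem.List.slice arr none (some i) ++ PySem.List.slice arr (some (i + 1)) none with hb
  have hblen : ((base.length : Int) + 1) = (arr.length : Int) := by
    rw [hb, PySem.List.slice_to arr hi.1, PySem.List.slice_from arr (by omega : (0:Int) ≤ i + 1)]
    simp only [List.length_append, List.length_take, List.length_drop]
    omega
  rw [← hblen, pvRowA base e, pvRowB base e]
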